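-- pv_equiv track=rewrite | github.com/sonjuhyeon/programmers_coding_test | 프로그래머스/1/159994. 카드 뭉치/카드 뭉치.py | solution
-- ===== SOURCE A (Python) =====
-- def solution(cards1, cards2, goal):
--     answer = ''
--     idx1 = 0
--     idx2 = 0
--     for word in goal:
--         if idx1 < len(cards1) and word == cards1[idx1]:
--             idx1 += 1
--         if idx2 < len(cards2) and word == cards2[idx2]:
--             idx2 += 1
--     if len(goal) == idx1 + idx2:
--         answer = 'Yes'
--     else:
--         answer = "No"
--     return answer
-- ===== SOURCE B (Python) =====
-- def matched(cards, goal):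
--     # how many leading cards can be drawn: consume goal lazily, one card at a time
--     it = iter(goal)
--     n = 0
--     for card in cards:
--         if card not in it:   # scans the iterator up to (and including) the first match
--             return n
--         n += 1
--     return n
--
--
-- def solution(cards1, cards2, goal):
--     return 'Yes' if matched(cards1, goal) + matched(cards2, goal) == len(goal) else 'No'
-- ===== Notes on version B (the rewrite author's own statement) =====
-- stated objective: idiomatic
-- what changed: Replaces A's single combined pass with two mutable indices by a helper that iterates over each deck and lazily consumes the goal via an iterator membership test, then compares the sum of the two match counts with len(goal).
import Mathlib
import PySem

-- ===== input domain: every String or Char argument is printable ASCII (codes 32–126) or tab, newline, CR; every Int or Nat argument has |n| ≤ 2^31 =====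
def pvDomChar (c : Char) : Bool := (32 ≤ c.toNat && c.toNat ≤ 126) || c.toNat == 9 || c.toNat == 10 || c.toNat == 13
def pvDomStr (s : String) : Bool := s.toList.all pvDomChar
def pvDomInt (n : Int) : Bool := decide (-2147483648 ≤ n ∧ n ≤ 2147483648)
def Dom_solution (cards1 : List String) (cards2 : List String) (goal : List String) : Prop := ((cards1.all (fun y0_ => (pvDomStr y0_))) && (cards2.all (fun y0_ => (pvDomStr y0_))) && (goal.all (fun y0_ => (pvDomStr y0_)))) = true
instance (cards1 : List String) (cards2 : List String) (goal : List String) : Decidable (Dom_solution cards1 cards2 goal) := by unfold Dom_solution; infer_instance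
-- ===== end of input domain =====

-- B replaces A's single pass with two independent indices by a per-deck helper that
-- walks the deck and lazily consumes the goal, then sums the two counts (objective: idiomatic).

-- ===== PORT A =====
def solution (cards1 : List String) (cards2 : List String) (goal : List String) : String :=
  let s : Int × Int := goal.foldl (fun (p : Int × Int) word =>
    let i1 : Int := if p.1 < (cards1.length : Int) ∧ PySem.List.pyGet? cards1 p.1 = some word then p.1 + 1 else p.1
    let i2 : Int := if p.2 < (cards2.length : Int) ∧ PySem.List.pyGet? cards2 p.2 = some word then p.2 + 1 else p.2
    (i1, i2)) (0, 0)
  if (goal.length : Int) = s.1 + s.2 then "Yes" else "No"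

-- ===== PORT B =====
-- Python's `card in it` on an iterator: consume elements up to the first match;
-- some rest = found (remaining iterator), none = exhausted without a match.
def consumeTo (it : List String) (card : String) : Option (List String) :=
  match it with
  | [] => none
  | x :: xs => if x = card then some xs else consumeTo xs card

def matched : List String → List String → Int
  | [], _ => 0
  | card :: cs, it =>
    match consumeTo it card with
    | none => 0
    | some it' => 1 + matched cs it'

def solution_alt (cards1 : List String) (cards2 : List String) (goal : List String) : String :=
  if matched cards1 goal + matched cards2 goal = (goal.length : Int) then "Yes" else "No"

-- ===== PRECONDITION & SPEC =====
def Spec_solution (cards1 : List String) (cards2 : List String) (goal : List String) (out : String) : Prop := out = solution_alt cards1 cards2 goal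
instance (cards1 : List String) (cards2 : List String) (goal : List String) (out : String) : Decidable (Spec_solution cards1 cards2 goal out) := by unfold Spec_solution; infer_instance

-- ===== CLAIM (what is proved, stated in full; the proofs are below) =====
def Claim_equal_solution : Prop := ∀ (cards1 : List String) (cards2 : List String) (goal : List String), Dom_solution cards1 cards2 goal → Spec_solution cards1 cards2 goal (solution cards1 cards2 goal)

-- ===== LEMMAS AND PROOFS =====

-- proof-only bridge: the same count, by recursion on the goal instead of the deck
def matchedG : List String → List String → Int
  | [], _ => 0
  | _ :: _, [] => 0
  | c :: cs, g :: gs => if c = g then 1 + matchedG cs gs else matchedG (c :: cs) gs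

theorem matchedG_nil_left (goal : List String) : matchedG [] goal = 0 := by
  cases goal <;> rfl

theorem matchedG_eq_matched (goal cards : List String) :
    matchedG cards goal = matched cards goal := by
  induction goal generalizing cards with
  | nil => cases cards <;> rfl
  | cons g gs ih =>
    cases cards with
    | nil => rfl
    | cons c cs =>
      by_cases hc : c = g
      · simp [matchedG, matched, consumeTo, hc, ih cs]
      · have hne : ¬ (g = c) := fun h => hc h.symm
        have : matched (c :: cs) gs = matched (c :: cs) (g :: gs) := by
          simp [matched, consumeTo, hne]
        simp [matchedG, hc, ih (c :: cs), this]

-- one component of A's loop, started at index i, ends at i + matchedG (cards.drop i) goal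
theorem foldl_step_eq (cards : List String) (goal : List String) (i : Nat) :
    goal.foldl (fun (p : Int) w =>
      if p < (cards.length : Int) ∧ PySem.List.pyGet? cards p = some w then p + 1 else p)
      (i : Int)
    = (i : Int) + matchedG (cards.drop i) goal := by
  induction goal generalizing i with
  | nil => cases cards.drop i <;> simp [matchedG]
  | cons g gs ih =>
    rcases h : cards.drop i with _ | ⟨c, rest⟩
    · have hlen : cards.length ≤ i := by
        simpa using List.drop_eq_nil_iff.mp h
      have hcond : ¬ ((i : Int) < (cards.length : Int) ∧ PySem.List.pyGet? cards (i : Int) = some g) := by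
        rintro ⟨hlt, -⟩; exact absurd (by exact_mod_cast hlt) (not_lt.mpr hlen)
      simp only [List.foldl_cons, if_neg hcond]
      rw [ih i, h, matchedG_nil_left, matchedG_nil_left]
    · have hi : i < cards.length := by
        by_contra hge
        simp [List.drop_eq_nil_iff.mpr (not_lt.mp hge)] at h
      have hget : PySem.List.pyGet? cards (i : Int) = some cards[i] := by
        simp [PySem.List.pyGet?_natCast, List.getElem?_eq_getElem hi]
      have hc : cards[i] = c := by
        have h0 : (cards.drop i)[0]? = some c := by simp [h]
        rw [List.getElem?_drop] at h0
        simpa [List.getElem?_eq_getElem hi] using h0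
      have hrest : cards.drop (i + 1) = rest := by
        have : cards.drop (i + 1) = (cards.drop i).drop 1 := by
          rw [List.drop_drop]
        simp [this, h]
      by_cases hcg : c = g
      · have hcond : ((i : Int) < (cards.length : Int) ∧ PySem.List.pyGet? cards (i : Int) = some g) := by
          exact ⟨by exact_mod_cast hi, by rw [hget, hc, hcg]⟩
        simp only [List.foldl_cons, if_pos hcond]
        have : ((i : Int) + 1) = ((i + 1 : Nat) : Int) := by push_cast; ring
        rw [this, ih (i + 1), hrest, matchedG, if_pos hcg]
        push_cast; ring
      · have hcond : ¬ ((i : Int) < (cards.length : Int) ∧ PySem.List.pyGet? cards (i : Int) = some g) := by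
          rintro ⟨-, hv⟩
          rw [hget, hc] at hv
          exact hcg (Option.some.injEq .. ▸ hv)
        simp only [List.foldl_cons, if_neg hcond]
        rw [ih i, h, matchedG, if_neg hcg]

-- the paired fold splits into two independent folds
theorem foldl_pair_split (f g : Int → String → Int) (goal : List String) (a b : Int) :
    goal.foldl (fun (p : Int × Int) w => (f p.1 w, g p.2 w)) (a, b)
    = (goal.foldl f a, goal.foldl g b) := by
  induction goal generalizing a b with
  | nil => rfl
  | cons x xs ih => simp [List.foldl_cons, ih]

-- ===== VERDICT (by name: the statement is the Claim_ definition above) =====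
theorem solution_spec : Claim_equal_solution := by
  intro cards1 cards2 goal _
  unfold Spec_solution solution solution_alt
  dsimp only
  rw [foldl_pair_split
    (fun (p : Int) w => if p < (cards1.length : Int) ∧ PySem.List.pyGet? cards1 p = some w then p + 1 else p)
    (fun (p : Int) w => if p < (cards2.length : Int) ∧ PySem.List.pyGet? cards2 p = some w then p + 1 else p)
    goal 0 0]
  have h1 := foldl_step_eq cards1 goal 0
  have h2 := foldl_step_eq cards2 goal 0
  simp only [Nat.cast_zero, zero_add, List.drop_zero, matchedG_eq_matched] at h1 h2
  rw [h1, h2]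
  by_cases h : matched cards1 goal + matched cards2 goal = (goal.length : Int)
  · rw [if_pos h, if_pos h.symm]
  · rw [if_neg h, if_neg (fun hh => h hh.symm)]
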